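-- pv_equiv track=rewrite | github.com/pwrwpw/algorithm-study | pwrwpw/week_2/[BOJ]기적의 매매법_20546.py | sungMin
-- ===== SOURCE A (Python) =====
-- def sungMin(money,stocks):
--     stock,up_count,down_count = 0,0,0
--     for i in range(len(stocks)):
--         if i < 13 and i > 0: #상승
--             if stocks[i] < stocks[i+1]:
--                 up_count += 1
--                 down_count = 0
--         if i < 13 and i > 0: #하락
--             if stocks[i] > stocks[i+1]:
--                 up_count = 0
--                 down_count += 1
--         if up_count >= 3: # 상승시 전량 매도
--             while stock > 0:
--                 money += stocks[i]
--                 stock -= 1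
--         if down_count >= 3:
--             while money >= stocks[i]:
--                 money -= stocks[i]
--                 stock += 1
--     return money,stock
-- ===== SOURCE B (Python) =====
-- def sungMin(money, stocks):
--     # Pass 1: streak counting only, recording (kind, price) actions;
--     # Pass 2: apply actions with closed-form trades (stock*price sell, floordiv buy).
--     up = down = 0
--     actions = []
--     for i in range(len(stocks)):
--         if 0 < i < 13:
--             if stocks[i] < stocks[i + 1]:
--                 up += 1
--                 down = 0
--             elif stocks[i] > stocks[i + 1]:
--                 up = 0
--                 down += 1
--         if up >= 3:
--             actions.append(('sell', stocks[i]))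
--         if down >= 3:
--             actions.append(('buy', stocks[i]))
--     stock = 0
--     for kind, price in actions:
--         if kind == 'sell':
--             money += stock * price
--             stock = 0
--         else:
--             n = max(money, 0) // price
--             stock += n
--             money -= n * price
--     return money, stock
-- ===== Notes on version B (the rewrite author's own statement) =====
-- stated objective: alternative
-- what changed: Replaces A's one-pass simulation with per-share while loops by a two-pass decomposition: first record the list of (sell/buy, price) action days from the streak logic, then apply them with closed-form trades (money += stock*price; n = money//price).
-- outside the precondition, e.g. on sungMin(-5, [5, 1, 2, 3, 4, 5, 6, 7, 8, 9, 10, 11, 12, 0]): A returns (-5, 0), B returns (-5, 0)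
import Mathlib
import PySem

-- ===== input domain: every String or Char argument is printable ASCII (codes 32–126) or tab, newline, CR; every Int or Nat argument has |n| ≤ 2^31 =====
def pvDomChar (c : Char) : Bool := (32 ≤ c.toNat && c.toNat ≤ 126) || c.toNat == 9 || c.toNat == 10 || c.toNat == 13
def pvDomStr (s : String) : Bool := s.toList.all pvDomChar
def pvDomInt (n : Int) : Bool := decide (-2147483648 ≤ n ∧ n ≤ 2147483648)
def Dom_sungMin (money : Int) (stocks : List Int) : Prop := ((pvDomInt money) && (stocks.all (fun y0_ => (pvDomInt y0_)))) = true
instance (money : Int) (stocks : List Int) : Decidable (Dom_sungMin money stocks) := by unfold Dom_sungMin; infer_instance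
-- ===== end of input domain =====

-- B replaces A's one-pass per-share simulation by a two-pass decomposition: record the
-- (sell/buy, price) action days first, then apply them with closed-form trades (floor division).

-- ===== PORT A =====
-- while stock > 0: money += price; stock -= 1
def pvSellLoop (money stock price : Int) : Int × Int :=
  if h : 0 < stock then pvSellLoop (money + price) (stock - 1) price else (money, stock)
termination_by stock.toNat
decreasing_by omega

-- while money >= price: money -= price; stock += 1
-- the '1 ≤ price' guard only makes the loop total (Python diverges there; excluded by Pre_)
def pvBuyLoop (money stock price : Int) : Int × Int :=
  if h : 1 ≤ price ∧ price ≤ money then pvBuyLoop (money - price) (stock + 1) price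
  else (money, stock)
termination_by money.toNat
decreasing_by omega

def pvStepA (stocks : List Int) (st : Int × Int × Int × Int) (i : Nat) : Int × Int × Int × Int :=
  match st with
  | (m, s, u, d) =>
    let ud1 :=
      if 0 < i ∧ i < 13 then
        (if stocks.getD i 0 < stocks.getD (i+1) 0 then (u + 1, (0 : Int)) else (u, d))
      else (u, d)
    let ud2 :=
      if 0 < i ∧ i < 13 then
        (if stocks.getD i 0 > stocks.getD (i+1) 0 then ((0 : Int), ud1.2 + 1) else ud1)
      else ud1
    let ms1 := if ud2.1 ≥ 3 then pvSellLoop m s (stocks.getD i 0) else (m, s)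
    let ms2 := if ud2.2 ≥ 3 then pvBuyLoop ms1.1 ms1.2 (stocks.getD i 0) else ms1
    (ms2.1, ms2.2, ud2.1, ud2.2)

def sungMin (money : Int) (stocks : List Int) : Int × Int :=
  let r := (List.range stocks.length).foldl (pvStepA stocks) (money, 0, 0, 0)
  (r.1, r.2.1)

-- ===== PORT B =====
def pvStepB (stocks : List Int) (st : Int × Int × List (String × Int)) (i : Nat) :
    Int × Int × List (String × Int) :=
  match st with
  | (u, d, acts) =>
    let p := stocks.getD i 0
    let ud :=
      if 0 < i ∧ i < 13 then
        (if p < stocks.getD (i+1) 0 then (u + 1, (0 : Int))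
         else if p > stocks.getD (i+1) 0 then ((0 : Int), d + 1)
         else (u, d))
      else (u, d)
    let acts1 := if ud.1 ≥ 3 then acts ++ [("sell", p)] else acts
    let acts2 := if ud.2 ≥ 3 then acts1 ++ [("buy", p)] else acts1
    (ud.1, ud.2, acts2)

def pvApply (st : Int × Int) (a : String × Int) : Int × Int :=
  if a.1 == "sell" then (st.1 + st.2 * a.2, 0)
  else
    let n := PySem.Int.floordiv (max st.1 0) a.2
    (st.1 - n * a.2, st.2 + n)

def sungMin_alt (money : Int) (stocks : List Int) : Int × Int :=
  let fp := (List.range stocks.length).foldl (pvStepB stocks) (0, 0, [])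
  fp.2.2.foldl pvApply (money, 0)

-- ===== PRECONDITION & SPEC =====
-- Pre_ excludes lengths 2–13 (A raises IndexError at stocks[i+1]) and, for longer lists,
-- any non-positive price (A's buy while-loop can run forever on such a day); this slightly
-- narrows the domain: on some long lists with a non-positive price that never becomes a buy
-- day A still returns normally (see claim cites).
def Pre_sungMin (money : Int) (stocks : List Int) : Prop :=
  stocks.length ≤ 1 ∨ (14 ≤ stocks.length ∧ ∀ p ∈ stocks, 1 ≤ p)
instance (money : Int) (stocks : List Int) : Decidable (Pre_sungMin money stocks) := by
  unfold Pre_sungMin; infer_instance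

def pvWitness_sungMin : Int × List Int :=
  (50, [5, 9, 8, 7, 6, 5, 4, 3, 2, 1, 2, 3, 4, 5])

def Spec_sungMin (money : Int) (stocks : List Int) (out : Int × Int) : Prop := out = sungMin_alt money stocks
instance (money : Int) (stocks : List Int) (out : Int × Int) : Decidable (Spec_sungMin money stocks out) := by unfold Spec_sungMin; infer_instance

-- ===== CLAIM (what is proved, stated in full; the proofs are below) =====
def Claim_equal_sungMin : Prop := ∀ (money : Int) (stocks : List Int), Dom_sungMin money stocks → Pre_sungMin money stocks → Spec_sungMin money stocks (sungMin money stocks)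

-- ===== LEMMAS AND PROOFS =====

theorem pvSellLoop_eq (money stock price : Int) (hs : 0 ≤ stock) :
    pvSellLoop money stock price = (money + stock * price, 0) := by
  by_cases h : 0 < stock
  · rw [pvSellLoop, dif_pos h]
    rw [pvSellLoop_eq (money + price) (stock - 1) price (by omega)]
    simp only [Prod.mk.injEq]; constructor
    · ring
    · trivial
  · rw [pvSellLoop, dif_neg h]
    have : stock = 0 := by omega
    simp [this]
termination_by stock.toNat
decreasing_by omega

theorem pvBuyLoop_eq (money stock price : Int) (hp : 1 ≤ price) :
    pvBuyLoop money stock price =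
      (money - PySem.Int.floordiv (max money 0) price * price,
       stock + PySem.Int.floordiv (max money 0) price) := by
  by_cases h : price ≤ money
  · rw [pvBuyLoop, dif_pos ⟨hp, h⟩]
    rw [pvBuyLoop_eq (money - price) (stock + 1) price hp]
    have hm : (0:Int) ≤ money := le_trans (by omega) h
    have h1 : max money 0 = money := by omega
    have h2 : max (money - price) 0 = money - price := by omega
    have key : PySem.Int.floordiv money price = PySem.Int.floordiv (money - price) price + 1 := by
      rw [PySem.Int.floordiv_eq_ediv_of_pos (by omega), PySem.Int.floordiv_eq_ediv_of_pos (by omega)]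
      have := Int.add_mul_ediv_right (money - price) 1 (show price ≠ 0 by omega)
      simp at this
      omega
    rw [h1, h2, key]; simp only [Prod.mk.injEq]; constructor <;> ring
  · rw [pvBuyLoop, dif_neg (by tauto)]
    have : PySem.Int.floordiv (max money 0) price = 0 := by
      rw [PySem.Int.floordiv_eq_ediv_of_pos (by omega)]
      exact Int.ediv_eq_zero_of_lt (by omega) (by omega)
    simp [this]
termination_by money.toNat
decreasing_by omega

theorem pvStepB_acc (stocks : List Int) (u d : Int) (acc : List (String × Int)) (i : Nat) :
    pvStepB stocks (u, d, acc) i =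
      ((pvStepB stocks (u, d, []) i).1, (pvStepB stocks (u, d, []) i).2.1,
       acc ++ (pvStepB stocks (u, d, []) i).2.2) := by
  simp only [pvStepB]
  split_ifs <;> simp

theorem pvFoldB_acc (stocks : List Int) (l : List Nat) (u d : Int) (acc : List (String × Int)) :
    l.foldl (pvStepB stocks) (u, d, acc) =
      ((l.foldl (pvStepB stocks) (u, d, []) ).1,
       (l.foldl (pvStepB stocks) (u, d, []) ).2.1,
       acc ++ (l.foldl (pvStepB stocks) (u, d, []) ).2.2) := by
  induction l generalizing u d acc with
  | nil => simp
  | cons i l ih =>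
    simp only [List.foldl_cons]
    rw [pvStepB_acc stocks u d acc i]
    rw [ih _ _ (acc ++ (pvStepB stocks (u, d, []) i).2.2),
        ih _ _ ((pvStepB stocks (u, d, []) i).2.2)]
    simp

theorem pvTrig (p m s u2 d2 : Int) (hs : 0 ≤ s) (hp : 1 ≤ p) :
    (((if d2 ≥ 3 then
         pvBuyLoop (if u2 ≥ 3 then pvSellLoop m s p else (m, s)).1
                   (if u2 ≥ 3 then pvSellLoop m s p else (m, s)).2 p
       else if u2 ≥ 3 then pvSellLoop m s p else (m, s)).1,
      (if d2 ≥ 3 then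
         pvBuyLoop (if u2 ≥ 3 then pvSellLoop m s p else (m, s)).1
                   (if u2 ≥ 3 then pvSellLoop m s p else (m, s)).2 p
       else if u2 ≥ 3 then pvSellLoop m s p else (m, s)).2,
      u2, d2) =
      (((if d2 ≥ 3 then
           (if u2 ≥ 3 then ([("sell", p)] : List (String × Int)) else []) ++ [("buy", p)]
         else if u2 ≥ 3 then [("sell", p)] else []).foldl pvApply (m, s)).1,
       ((if d2 ≥ 3 then
           (if u2 ≥ 3 then ([("sell", p)] : List (String × Int)) else []) ++ [("buy", p)]
         else if u2 ≥ 3 then [("sell", p)] else []).foldl pvApply (m, s)).2,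
       u2, d2))
    ∧ 0 ≤ ((if d2 ≥ 3 then
           (if u2 ≥ 3 then ([("sell", p)] : List (String × Int)) else []) ++ [("buy", p)]
         else if u2 ≥ 3 then [("sell", p)] else []).foldl pvApply (m, s)).2 := by
  have hn : ∀ mm : Int, 0 ≤ PySem.Int.floordiv (max mm 0) p := by
    intro mm
    rw [PySem.Int.floordiv_eq_ediv_of_pos (by omega)]
    exact Int.ediv_nonneg (by omega) (by omega)
  by_cases h1 : u2 ≥ 3 <;> by_cases h2 : d2 ≥ 3 <;>
    simp [h1, h2, pvApply, pvSellLoop_eq _ _ _ hs, pvBuyLoop_eq _ _ _ hp] <;>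
    first
      | omega
      | (exact add_nonneg hs (hn _))
      | (have := hn m; have := hn (m + s * p); omega)

theorem pvStep_eq (stocks : List Int) (i : Nat) (m s u d : Int) (hs : 0 ≤ s)
    (hp : 1 ≤ stocks.getD i 0) :
    (pvStepA stocks (m, s, u, d) i =
      (((pvStepB stocks (u, d, []) i).2.2.foldl pvApply (m, s)).1,
       ((pvStepB stocks (u, d, []) i).2.2.foldl pvApply (m, s)).2,
       (pvStepB stocks (u, d, []) i).1, (pvStepB stocks (u, d, []) i).2.1))
    ∧ 0 ≤ ((pvStepB stocks (u, d, []) i).2.2.foldl pvApply (m, s)).2 := by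
  have key := pvTrig (stocks.getD i 0) m s
  simp only [pvStepA, pvStepB]
  by_cases hc : 0 < i ∧ i < 13
  · by_cases hlt : stocks.getD i 0 < stocks.getD (i+1) 0
    · have hgt : ¬ stocks.getD i 0 > stocks.getD (i+1) 0 := by omega
      simp only [if_pos hc, if_pos hlt, if_neg hgt, List.nil_append]
      exact key (u+1) 0 hs hp
    · by_cases hgt : stocks.getD i 0 > stocks.getD (i+1) 0
      · simp only [if_pos hc, if_neg hlt, if_pos hgt, List.nil_append]
        exact key 0 (d+1) hs hp
      · simp only [if_pos hc, if_neg hlt, if_neg hgt, List.nil_append]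
        exact key u d hs hp
  · simp only [if_neg hc, List.nil_append]
    exact key u d hs hp

theorem pvMain (stocks : List Int) (l : List Nat) :
    ∀ (m s u d : Int), 0 ≤ s → (∀ i ∈ l, 1 ≤ stocks.getD i 0) →
      l.foldl (pvStepA stocks) (m, s, u, d) =
        (((l.foldl (pvStepB stocks) (u, d, [])).2.2.foldl pvApply (m, s)).1,
         ((l.foldl (pvStepB stocks) (u, d, [])).2.2.foldl pvApply (m, s)).2,
         (l.foldl (pvStepB stocks) (u, d, [])).1,
         (l.foldl (pvStepB stocks) (u, d, [])).2.1) := by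
  induction l with
  | nil => intro m s u d _ _; simp
  | cons i l ih =>
    intro m s u d hs hall
    have hp : 1 ≤ stocks.getD i 0 := hall i (List.mem_cons_self ..)
    have hstep := pvStep_eq stocks i m s u d hs hp
    rcases hb : pvStepB stocks (u, d, []) i with ⟨u2, d2, δ⟩
    rw [hb] at hstep
    simp only [List.foldl_cons]
    rw [hstep.1, ih _ _ _ _ hstep.2 (fun j hj => hall j (List.mem_cons_of_mem _ hj))]
    rw [hb, pvFoldB_acc stocks l u2 d2 δ, List.foldl_append]

-- ===== VERDICT (by name: the statement is the Claim_ definition above) =====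
theorem sungMin_spec : Claim_equal_sungMin := by
  intro money stocks _ hpre
  unfold Spec_sungMin
  rcases hpre with hshort | ⟨hlen, hpos⟩
  · rcases stocks with _ | ⟨x, _ | ⟨y, t⟩⟩
    · simp [sungMin, sungMin_alt]
    · simp [sungMin, sungMin_alt, pvStepA, pvStepB]
    · simp at hshort
  · have hall : ∀ i ∈ List.range stocks.length, 1 ≤ stocks.getD i 0 := by
      intro i hi
      rw [List.getD_eq_getElem _ _ (List.mem_range.mp hi)]
      exact hpos _ (List.getElem_mem _)
    show sungMin money stocks = sungMin_alt money stocks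
    unfold sungMin sungMin_alt
    rw [pvMain stocks _ money 0 0 0 le_rfl hall]
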